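-- pv_equiv track=rewrite | github.com/fernaldifz/classical-cryptography | src/oneTimePad.py | encryptTextOTP
-- ===== SOURCE A (Python) =====
-- def encryptTextOTP(inputString, key):
--     result = ""
--     filteredString = filterAlphabet(inputString)
--     for i in range(len(filteredString)):
--         char = (ord(filteredString[i].upper()) + ord(key[i].upper())) % 26
--         char += ord('A')
--         result += chr(char)
--     return result
--
-- def filterAlphabet(inputString):
--     alphabet = ""
--     for character in inputString:
--         if character.isalpha():
--             alphabet += character
--     return alphabet
-- ===== SOURCE B (Python) =====
-- def encryptTextOTP(inputString, key):
--     out = []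
--     j = 0
--     for c in inputString:
--         if c.isalpha():
--             out.append(chr((ord(c.upper()) + ord(key[j].upper())) % 26 + ord('A')))
--             j += 1
--     return "".join(out)
-- ===== Notes on version B (the rewrite author's own statement) =====
-- stated objective: simpler
-- what changed: Fuses A's two passes (filterAlphabet building an intermediate string, then an index loop over it) into one pass over inputString with an explicit key-position counter and a list accumulator joined at the end.
import Mathlib
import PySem

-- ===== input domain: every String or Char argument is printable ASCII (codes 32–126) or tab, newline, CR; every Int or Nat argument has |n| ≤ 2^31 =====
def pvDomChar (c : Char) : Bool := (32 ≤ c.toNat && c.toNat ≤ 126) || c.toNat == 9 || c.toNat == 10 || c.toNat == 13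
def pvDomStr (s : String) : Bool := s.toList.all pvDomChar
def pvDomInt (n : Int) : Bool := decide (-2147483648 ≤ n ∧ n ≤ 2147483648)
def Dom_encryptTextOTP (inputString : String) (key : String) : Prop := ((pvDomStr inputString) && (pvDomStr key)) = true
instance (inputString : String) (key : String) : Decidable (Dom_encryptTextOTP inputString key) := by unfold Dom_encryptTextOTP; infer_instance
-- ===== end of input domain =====

-- B fuses A's filter pass and encrypt pass into one loop with a key-position counter (objective: simpler).

-- ===== PORT A =====
def filterAlphabet (inputString : String) : String :=
  String.ofList (inputString.toList.foldl
    (fun alphabet character =>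
      if PySem.Chars.isalpha character then alphabet ++ [character] else alphabet) [])

def encryptTextOTP (inputString : String) (key : String) : String :=
  let filteredString := (filterAlphabet inputString).toList
  let keyChars := key.toList
  String.ofList ((PySem.List.pyRange 0 filteredString.length).foldl
    (fun result i =>
      match PySem.List.pyGet? filteredString i, PySem.List.pyGet? keyChars i with
      | some fc, some kc =>
          -- ord values are nonnegative, so Python's % 26 is exactly Nat %
          result ++ [Char.ofNat (((PySem.Chars.upperChar fc).toNat
              + (PySem.Chars.upperChar kc).toNat) % 26 + 65)]
      | _, _ => result  -- key[i] out of range: Python raises IndexError; outside Pre_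
    ) [])

-- ===== PORT B =====
def otpGo (cs : List Char) (kl : List Char) (j : Nat) : List Char :=
  match cs with
  | [] => []
  | c :: rest =>
    if PySem.Chars.isalpha c then
      match kl[j]? with
      | some kc =>
          Char.ofNat (((PySem.Chars.upperChar c).toNat
              + (PySem.Chars.upperChar kc).toNat) % 26 + 65) :: otpGo rest kl (j + 1)
      | none => otpGo rest kl (j + 1)  -- key[j] out of range: Python raises IndexError; outside Pre_
    else otpGo rest kl j

def encryptTextOTP_alt (inputString : String) (key : String) : String :=
  String.ofList (otpGo inputString.toList key.toList 0)

-- ===== PRECONDITION & SPEC =====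
-- Pre_ excludes exactly the inputs where the key is shorter than the number of alphabetic
-- characters of inputString: there both Pythons raise IndexError.
def Pre_encryptTextOTP (inputString : String) (key : String) : Prop :=
  inputString.toList.countP PySem.Chars.isalpha ≤ key.toList.length
instance (inputString : String) (key : String) : Decidable (Pre_encryptTextOTP inputString key) := by
  unfold Pre_encryptTextOTP; infer_instance
def pvWitness_encryptTextOTP : String × String := ("Hi, you!", "keypad")

def Spec_encryptTextOTP (inputString : String) (key : String) (out : String) : Prop :=
  out = encryptTextOTP_alt inputString key
instance (inputString : String) (key : String) (out : String) : Decidable (Spec_encryptTextOTP inputString key out) := by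
  unfold Spec_encryptTextOTP; infer_instance

-- ===== CLAIM (what is proved, stated in full; the proofs are below) =====
def Claim_equal_encryptTextOTP : Prop := ∀ (inputString : String) (key : String), Dom_encryptTextOTP inputString key → Pre_encryptTextOTP inputString key → Spec_encryptTextOTP inputString key (encryptTextOTP inputString key)

-- ===== LEMMAS AND PROOFS =====

-- the common per-character encryption and the common "consume both lists in step" shape
def otpChar (c k : Char) : Char :=
  Char.ofNat (((PySem.Chars.upperChar c).toNat + (PySem.Chars.upperChar k).toNat) % 26 + 65)

def encPair : List Char → List Char → List Char
  | c :: cs, k :: ks => otpChar c k :: encPair cs ks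
  | _, _ => []

theorem filter_fold (l : List Char) :
    ∀ acc : List Char,
    l.foldl (fun alphabet character =>
      if PySem.Chars.isalpha character then alphabet ++ [character] else alphabet) acc
      = acc ++ l.filter PySem.Chars.isalpha := by
  induction l with
  | nil => intro acc; simp
  | cons c rest ih =>
      intro acc
      by_cases hc : PySem.Chars.isalpha c <;> simp [hc, ih]

theorem filterAlphabet_toList (s : String) :
    (filterAlphabet s).toList = s.toList.filter PySem.Chars.isalpha := by
  unfold filterAlphabet
  rw [filter_fold]
  simp

theorem loopA (fl kl : List Char) (h : fl.length ≤ kl.length) :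
    ∀ (n a : Nat) (acc : List Char), fl.length - a ≤ n →
    (PySem.List.pyRange (a : Int) (fl.length : Int)).foldl
      (fun result i =>
        match PySem.List.pyGet? fl i, PySem.List.pyGet? kl i with
        | some fc, some kc =>
            result ++ [Char.ofNat (((PySem.Chars.upperChar fc).toNat
                + (PySem.Chars.upperChar kc).toNat) % 26 + 65)]
        | _, _ => result) acc
      = acc ++ encPair (fl.drop a) (kl.drop a) := by
  intro n
  induction n with
  | zero =>
      intro a acc hn
      have ha : fl.length ≤ a := by omega
      have hr : ¬ ((a : Int) < (fl.length : Int)) := by exact_mod_cast not_lt.mpr ha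
      simp [PySem.List.pyRange, hr, List.drop_eq_nil_of_le ha, encPair]
  | succ n ih =>
      intro a acc hn
      by_cases ha : a < fl.length
      · have hk : a < kl.length := lt_of_lt_of_le ha h
        rw [PySem.List.pyRange_one_cons (by exact_mod_cast ha)]
        have hcast : ((a : Int) + 1) = ((a + 1 : Nat) : Int) := by push_cast; ring
        rw [List.foldl_cons, hcast]
        have hfl : PySem.List.pyGet? fl (a : Int) = some fl[a] := by
          rw [PySem.List.pyGet?_natCast]; simp [List.getElem?_eq_getElem ha]
        have hkl : PySem.List.pyGet? kl (a : Int) = some kl[a] := by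
          rw [PySem.List.pyGet?_natCast]; simp [List.getElem?_eq_getElem hk]
        rw [hfl, hkl, ih (a + 1) _ (by omega),
            List.drop_eq_getElem_cons ha, List.drop_eq_getElem_cons hk]
        simp [encPair, otpChar]
      · have ha' : fl.length ≤ a := by omega
        have hr : ¬ ((a : Int) < (fl.length : Int)) := by exact_mod_cast not_lt.mpr ha'
        simp [PySem.List.pyRange, hr, List.drop_eq_nil_of_le ha', encPair]

theorem loopB (kl : List Char) :
    ∀ (cs : List Char) (j : Nat), j + cs.countP PySem.Chars.isalpha ≤ kl.length →
    otpGo cs kl j = encPair (cs.filter PySem.Chars.isalpha) (kl.drop j) := by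
  intro cs
  induction cs with
  | nil => intro j _; simp [otpGo, encPair]
  | cons c rest ih =>
      intro j hj
      rw [otpGo]
      by_cases hc : PySem.Chars.isalpha c
      · have hcount : (c :: rest).countP PySem.Chars.isalpha
            = rest.countP PySem.Chars.isalpha + 1 := by simp [hc]
        rw [hcount] at hj
        have hjlt : j < kl.length := by omega
        rw [if_pos hc, List.getElem?_eq_getElem hjlt, ih (j + 1) (by omega)]
        conv_rhs => rw [List.drop_eq_getElem_cons hjlt]
        simp only [List.filter_cons, hc, ite_true, encPair, otpChar]
      · have hcount : (c :: rest).countP PySem.Chars.isalpha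
            = rest.countP PySem.Chars.isalpha := by simp [hc]
        rw [hcount] at hj
        rw [if_neg hc, ih j hj]
        simp [hc]

-- ===== VERDICT (by name: the statement is the Claim_ definition above) =====
theorem encryptTextOTP_spec : Claim_equal_encryptTextOTP := by
  intro s k _ hpre
  unfold Pre_encryptTextOTP at hpre
  unfold Spec_encryptTextOTP encryptTextOTP encryptTextOTP_alt
  have hlen : (s.toList.filter PySem.Chars.isalpha).length ≤ k.toList.length := by
    rw [← List.countP_eq_length_filter]; exact hpre
  have hA := loopA (s.toList.filter PySem.Chars.isalpha) k.toList hlen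
      (s.toList.filter PySem.Chars.isalpha).length 0 [] (by omega)
  have hB := loopB k.toList s.toList 0 (by simpa using hpre)
  push_cast at hA
  simp only [filterAlphabet_toList, hA, hB, List.drop_zero,
    List.nil_append]
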